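-- pv_equiv track=rewrite | github.com/mobarski/sandbox | nlp/nlp.py | get_mcdy
-- ===== SOURCE A (Python) =====
-- def get_mcdy(fsy):
-- 	"minimal class difference of feature score"
-- 	topics = fsy.keys()
-- 	mcdy = {y:{} for y in topics}
-- 	vocab = set()
-- 	for y in topics:
-- 		vocab.update(fsy[y])
-- 	for t in vocab:
-- 		for y in topics:
-- 			val = min([abs(fsy[y].get(t,0)-fsy[y2].get(t,0)) for y2 in topics if y!=y2])
-- 			if val:
-- 				mcdy[y][t] = val
-- 	return mcdy
-- ===== SOURCE B (Python) =====
-- def get_mcdy(fsy):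
--     "minimal class difference of feature score"
--     topics = list(fsy)
--     out = {y: {} for y in topics}
--     n = len(topics)
--     if n < 2:
--         return out
--     vocab = dict.fromkeys(t for ys in fsy.values() for t in ys)
--     for t in vocab:
--         scores = sorted(((fsy[y].get(t, 0), i) for i, y in enumerate(topics)), key=lambda p: p[0])
--         gaps = {}
--         for k, (v, i) in enumerate(scores):
--             if k == 0:
--                 g = scores[1][0] - v
--             elif k == n - 1:
--                 g = v - scores[k - 1][0]
--             else:
--                 g = min(v - scores[k - 1][0], scores[k + 1][0] - v)
--             gaps[i] = g
--         for i, y in enumerate(topics):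
--             g = gaps[i]
--             if g:
--                 out[y][t] = g
--     return out
-- ===== Notes on version B (the rewrite author's own statement) =====
-- stated objective: faster
-- what changed: Per term, B sorts the per-topic scores once and reads each topic's minimal absolute difference off the adjacent elements of the sorted list (nearest neighbour in 1D), replacing A's all-pairs inner scan over topics, so the per-term cost drops from O(Y^2) to O(Y log Y).
import Mathlib
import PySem

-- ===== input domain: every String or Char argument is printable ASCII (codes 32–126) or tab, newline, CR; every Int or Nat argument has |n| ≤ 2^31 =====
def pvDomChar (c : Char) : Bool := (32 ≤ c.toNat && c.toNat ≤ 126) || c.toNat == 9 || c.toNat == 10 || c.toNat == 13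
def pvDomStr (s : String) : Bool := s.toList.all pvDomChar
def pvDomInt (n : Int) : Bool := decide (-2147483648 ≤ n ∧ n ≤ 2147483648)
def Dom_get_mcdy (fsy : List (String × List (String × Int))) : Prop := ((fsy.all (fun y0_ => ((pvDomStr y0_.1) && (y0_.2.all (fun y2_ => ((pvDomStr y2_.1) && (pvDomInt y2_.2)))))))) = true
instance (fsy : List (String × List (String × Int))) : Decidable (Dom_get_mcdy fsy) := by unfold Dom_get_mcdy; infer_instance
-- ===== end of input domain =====

-- B replaces A's all-pairs inner scan over topics by one sort of the per-term scores and
-- adjacent-element (1D nearest neighbour) differences; equivalence of the RETURN value is proved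
-- on dict-representable inputs (no duplicate keys) on which A does not raise.

-- ===== PORT A =====
-- fsy[y] (y is always a key of fsy under Pre_; [] is an unreachable totalization default)
def pvLookup (fsy : List (String × List (String × Int))) (y : String) : List (String × Int) :=
  (PySem.Dict.mk fsy).getD y []

-- fsy[y].get(t, 0)
def pvScore (ys : List (String × Int)) (t : String) : Int :=
  (PySem.Dict.mk ys).getD t 0

def get_mcdy (fsy : List (String × List (String × Int))) : List (String × List (String × Int)) :=
  -- topics = fsy.keys()
  let topics := fsy.map (·.1)
  -- mcdy = {y:{} for y in topics}
  let mcdy0 : PySem.Dict String (PySem.Dict String Int) :=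
    topics.foldl (fun d y => d.insert y PySem.Dict.empty) PySem.Dict.empty
  -- vocab = set(); for y in topics: vocab.update(fsy[y])
  let vocab : PySem.Set String :=
    topics.foldl (fun v y => PySem.Set.update v ((pvLookup fsy y).map (·.1))) PySem.Set.empty
  -- for t in vocab: for y in topics: val = min([...]); if val: mcdy[y][t] = val
  let mcdy := vocab.foldl (fun m t =>
    topics.foldl (fun m y =>
      match PySem.List.min? ((topics.filter (fun y2 => y != y2)).map
          (fun y2 => |pvScore (pvLookup fsy y) t - pvScore (pvLookup fsy y2) t|)) (fun x => x) with
      | some val => if val ≠ 0 then m.modify y PySem.Dict.empty (fun inner => inner.insert t val) else m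
      | none => m) m) mcdy0   -- none: min([]) raises ValueError in Python; excluded by Pre_
  mcdy.items.map (fun p => (p.1, p.2.items))

-- ===== PORT B =====
-- gap of the k-th element (value v) of the sorted score list: distance to nearest neighbour
def pvGap (scores : List (Int × Int)) (n k v : Int) : Int :=
  if k = 0 then (PySem.List.pyGetD scores 1 (0, 0)).1 - v
  else if k = n - 1 then v - (PySem.List.pyGetD scores (k - 1) (0, 0)).1
  else min (v - (PySem.List.pyGetD scores (k - 1) (0, 0)).1)
           ((PySem.List.pyGetD scores (k + 1) (0, 0)).1 - v)

def get_mcdy_alt (fsy : List (String × List (String × Int))) : List (String × List (String × Int)) :=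
  let topics := fsy.map (·.1)
  let out0 : PySem.Dict String (PySem.Dict String Int) :=
    topics.foldl (fun d y => d.insert y PySem.Dict.empty) PySem.Dict.empty
  let n : Int := topics.length
  if n < 2 then out0.items.map (fun p => (p.1, p.2.items))
  else
    -- vocab = dict.fromkeys(t for ys in fsy.values() for t in ys)
    let vocab := PySem.List.dedup ((fsy.map (·.2)).flatMap (fun ys => ys.map (·.1)))
    let outF := vocab.foldl (fun m t =>
      -- scores = sorted(((fsy[y].get(t,0), i) for i,y in enumerate(topics)), key=lambda p: p[0])
      let scores := PySem.List.sorted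
        ((PySem.List.enumerate topics).map (fun p => (pvScore (pvLookup fsy p.2) t, p.1)))
        (fun q => q.1) false
      -- gaps = {}; for k,(v,i) in enumerate(scores): ... gaps[i] = g
      let gaps : PySem.Dict Int Int := (PySem.List.enumerate scores).foldl
        (fun d q => d.insert q.2.2 (pvGap scores n q.1 q.2.1)) PySem.Dict.empty
      -- for i,y in enumerate(topics): g = gaps[i]; if g: out[y][t] = g
      (PySem.List.enumerate topics).foldl (fun m p =>
        let g := (gaps.getD p.1 0)   -- gaps[i]; every index is a key when n ≥ 2
        if g ≠ 0 then m.modify p.2 PySem.Dict.empty (fun inner => inner.insert t g) else m) m) out0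
    outF.items.map (fun p => (p.1, p.2.items))

-- ===== PRECONDITION & SPEC =====
-- Pre_ excludes (i) association lists with duplicate outer or inner keys — not representable as
-- the Python dicts A receives, so the first-match list reading is not A's behaviour there — and
-- (ii) single-topic inputs with a non-empty feature dict, on which A raises ValueError (min of
-- an empty sequence).
def Pre_get_mcdy (fsy : List (String × List (String × Int))) : Prop :=
  (fsy.map (·.1)).Nodup ∧ (∀ p ∈ fsy, (p.2.map (·.1)).Nodup) ∧
  (fsy.length = 1 → ∀ p ∈ fsy, p.2 = [])
instance (fsy : List (String × List (String × Int))) : Decidable (Pre_get_mcdy fsy) := by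
  unfold Pre_get_mcdy; infer_instance

def pvWitness_get_mcdy : (List (String × List (String × Int))) :=
  [("a", [("t", 1), ("u", 3)]), ("b", [("t", 4)]), ("c", [])]

def Spec_get_mcdy (fsy : List (String × List (String × Int))) (out : List (String × List (String × Int))) : Prop := out = get_mcdy_alt fsy
instance (fsy : List (String × List (String × Int))) (out : List (String × List (String × Int))) : Decidable (Spec_get_mcdy fsy out) := by unfold Spec_get_mcdy; infer_instance

-- ===== CLAIM (what is proved, stated in full; the proofs are below) =====
def Claim_equal_get_mcdy : Prop := ∀ (fsy : List (String × List (String × Int))), Dom_get_mcdy fsy → Pre_get_mcdy fsy → Spec_get_mcdy fsy (get_mcdy fsy)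

-- ===== LEMMAS AND PROOFS =====

-- shorthand used only by the proofs: the per-term score function and sorted score list
def pvScoreF (fsy : List (String × List (String × Int))) (t y : String) : Int :=
  pvScore (pvLookup fsy y) t

def pvScores (ts : List String) (s : String → Int) : List (Int × Int) :=
  PySem.List.sorted ((PySem.List.enumerate ts).map (fun p => (s p.2, p.1))) (fun q => q.1) false

theorem length_pvScores (ts : List String) (s : String → Int) :
    (pvScores ts s).length = ts.length := by
  simp [pvScores, PySem.List.length_sorted, PySem.List.length_enumerate]

theorem mem_pvScores (ts : List String) (s : String → Int) (p : Int × Int) :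
    p ∈ pvScores ts s ↔ ∃ j, ∃ _ : j < ts.length, p = (s ts[j], (j : Int)) := by
  constructor
  · intro hp
    have := (PySem.List.sorted_perm _ _ _).mem_iff.mp hp
    rcases List.mem_map.mp this with ⟨q, hq, rfl⟩
    rcases (PySem.List.mem_enumerate_iff _ _ _).mp hq with ⟨j, hj, rfl⟩
    exact ⟨j, hj, by simp⟩
  · rintro ⟨j, hj, rfl⟩
    refine (PySem.List.sorted_perm _ _ _).mem_iff.mpr (List.mem_map.mpr ?_)
    exact ⟨((j : Int), ts[j]), (PySem.List.mem_enumerate_iff _ _ _).mpr ⟨j, hj, by simp⟩, rfl⟩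

theorem snds_nodup_pvScores (ts : List String) (s : String → Int) :
    ((pvScores ts s).map (·.2)).Nodup := by
  have hperm : ((pvScores ts s).map (·.2)).Perm
      ((((PySem.List.enumerate ts).map (fun p => (s p.2, p.1)))).map (·.2)) :=
    (PySem.List.sorted_perm _ _ _).map _
  refine hperm.nodup_iff.mpr ?_
  have : (((PySem.List.enumerate ts).map (fun p => (s p.2, p.1)))).map (·.2)
      = (PySem.List.enumerate ts).map (·.1) := by
    simp [List.map_map, Function.comp]
  rw [this, PySem.List.map_fst_enumerate]
  exact PySem.List.nodup_pyRange_one _ _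

theorem mono_pvScores (ts : List String) (s : String → Int) {p q : Nat} (hpq : p ≤ q)
    (hq : q < (pvScores ts s).length) :
    ((pvScores ts s)[p]'(by omega)).1 ≤ (pvScores ts s)[q].1 := by
  unfold pvScores at hq ⊢
  exact PySem.List.key_sorted_getElem_mono
    ((PySem.List.enumerate ts).map (fun p => (s p.2, p.1))) (fun q => q.1) hpq hq

-- evaluating pvGap branch by branch (Nat index k, Int arguments as the port passes them)
theorem pvGap_zero (L : List (Int × Int)) (v : Int) (k : Nat) (hk0 : k = 0)
    (hlen : 2 ≤ L.length) :
    pvGap L (L.length : Int) (k : Int) v = L[1].1 - v := by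
  subst hk0
  have h1 : PySem.List.pyGetD L 1 (0, 0) = L[(1 : Int).toNat]'(by omega) :=
    PySem.List.pyGetD_eq_getElem L (0, 0) (by omega) (by omega)
  unfold pvGap
  rw [Nat.cast_zero, if_pos rfl, h1]
  exact rfl

theorem pvGap_last (L : List (Int × Int)) (v : Int) (k : Nat) (_hk0 : k ≠ 0)
    (hk : k = L.length - 1) (hlen : 2 ≤ L.length) :
    pvGap L (L.length : Int) (k : Int) v = v - (L[k - 1]'(by omega)).1 := by
  have h1 : PySem.List.pyGetD L ((k : Int) - 1) (0, 0) = L[((k : Int) - 1).toNat]'(by omega) :=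
    PySem.List.pyGetD_eq_getElem L (0, 0) (by omega) (by omega)
  unfold pvGap
  rw [if_neg (by omega), if_pos (by omega), h1]
  simp only [show ((k : Int) - 1).toNat = k - 1 by omega]

theorem pvGap_mid (L : List (Int × Int)) (v : Int) (k : Nat) (hk0 : k ≠ 0)
    (hkl : k + 1 < L.length) :
    pvGap L (L.length : Int) (k : Int) v
      = min (v - (L[k - 1]'(by omega)).1) ((L[k + 1]'(by omega)).1 - v) := by
  have h1 : PySem.List.pyGetD L ((k : Int) - 1) (0, 0) = L[((k : Int) - 1).toNat]'(by omega) :=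
    PySem.List.pyGetD_eq_getElem L (0, 0) (by omega) (by omega)
  have h2 : PySem.List.pyGetD L ((k : Int) + 1) (0, 0) = L[((k : Int) + 1).toNat]'(by omega) :=
    PySem.List.pyGetD_eq_getElem L (0, 0) (by omega) (by omega)
  unfold pvGap
  rw [if_neg (by omega), if_neg (by omega), h1, h2]
  simp only [show ((k : Int) - 1).toNat = k - 1 by omega,
    show ((k : Int) + 1).toNat = k + 1 by omega]

-- nearest-neighbour characterisation of pvGap on a fst-sorted list
theorem pvGap_is_nearest (L : List (Int × Int))
    (hmono : ∀ p q : Nat, ∀ _ : p ≤ q, ∀ hq : q < L.length, (L[p]'(by omega)).1 ≤ L[q].1)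
    (hlen : 2 ≤ L.length) (k : Nat) (hk : k < L.length) :
    (∃ k', ∃ _ : k' < L.length, k' ≠ k ∧
        pvGap L (L.length : Int) (k : Int) L[k].1 = |L[k].1 - L[k'].1|) ∧
    (∀ k', ∀ _ : k' < L.length, k' ≠ k →
        pvGap L (L.length : Int) (k : Int) L[k].1 ≤ |L[k].1 - L[k'].1|) := by
  constructor
  · by_cases hk0 : k = 0
    · refine ⟨1, by omega, by omega, ?_⟩
      rw [pvGap_zero L _ k hk0 hlen]
      subst hk0
      have h01 : L[0].1 ≤ L[1].1 := hmono 0 1 (by omega) (by omega)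
      have habs : |L[0].1 - L[1].1| = L[1].1 - L[0].1 := by
        rw [abs_sub_comm]; exact abs_of_nonneg (by omega)
      exact habs.symm
    · by_cases hkl : k = L.length - 1
      · refine ⟨k - 1, by omega, by omega, ?_⟩
        rw [pvGap_last L _ k hk0 hkl hlen]
        have h01 : L[k-1].1 ≤ L[k].1 := hmono (k-1) k (by omega) hk
        have habs : |L[k].1 - L[k-1].1| = L[k].1 - L[k-1].1 := abs_of_nonneg (by omega)
        exact habs.symm
      · have hk1 : k + 1 < L.length := by omega
        have hle : L[k-1].1 ≤ L[k].1 := hmono (k-1) k (by omega) hk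
        have hge : L[k].1 ≤ L[k+1].1 := hmono k (k+1) (by omega) hk1
        rw [pvGap_mid L _ k hk0 hk1]
        rcases le_total (L[k].1 - L[k-1].1) (L[k+1].1 - L[k].1) with hc | hc
        · refine ⟨k - 1, by omega, by omega, ?_⟩
          have habs : |L[k].1 - L[k-1].1| = L[k].1 - L[k-1].1 := abs_of_nonneg (by omega)
          rw [min_eq_left hc]; exact habs.symm
        · refine ⟨k + 1, by omega, by omega, ?_⟩
          have habs : |L[k].1 - L[k+1].1| = L[k+1].1 - L[k].1 := by
            rw [abs_sub_comm]; exact abs_of_nonneg (by omega)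
          rw [min_eq_right hc]; exact habs.symm
  · intro k' hk' hne
    rcases Nat.lt_or_ge k' k with hlt | hge
    · have hk0 : k ≠ 0 := by omega
      have h1 : L[k'].1 ≤ L[k-1].1 := hmono k' (k-1) (by omega) (by omega)
      have h2 : L[k-1].1 ≤ L[k].1 := hmono (k-1) k (by omega) hk
      have habs : |L[k].1 - L[k'].1| = L[k].1 - L[k'].1 := abs_of_nonneg (by omega)
      rw [habs]
      by_cases hkl : k = L.length - 1
      · rw [pvGap_last L _ k hk0 hkl hlen]; omega
      · rw [pvGap_mid L _ k hk0 (by omega)]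
        have := min_le_left (L[k].1 - L[k-1].1) (L[k+1].1 - L[k].1)
        omega
    · have hgt : k < k' := by omega
      have hk1 : k + 1 < L.length := by omega
      have h1 : L[k+1].1 ≤ L[k'].1 := hmono (k+1) k' (by omega) hk'
      have h2 : L[k].1 ≤ L[k+1].1 := hmono k (k+1) (by omega) hk1
      have habs : |L[k].1 - L[k'].1| = L[k'].1 - L[k].1 := by
        rw [abs_sub_comm]; exact abs_of_nonneg (by omega)
      rw [habs]
      by_cases hk0 : k = 0
      · rw [pvGap_zero L _ k hk0 hlen]
        subst hk0
        simp only [Nat.zero_add] at h1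
        omega
      · rw [pvGap_mid L _ k hk0 hk1]
        have := min_le_right (L[k].1 - L[k-1].1) (L[k+1].1 - L[k].1)
        omega

-- the gaps dict of port B: looking up the second component of the k-th sorted pair
theorem gaps_getD (ts : List String) (s : String → Int) (n : Int) (k : Nat)
    (hk : k < (pvScores ts s).length) :
    ((PySem.List.enumerate (pvScores ts s)).foldl
        (fun d q => d.insert q.2.2 (pvGap (pvScores ts s) n q.1 q.2.1))
        PySem.Dict.empty).getD (pvScores ts s)[k].2 0
      = pvGap (pvScores ts s) n (k : Int) (pvScores ts s)[k].1 := by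
  set L := pvScores ts s with hL
  have hkeymap : (PySem.List.enumerate L).map (fun q => q.2.2) = L.map (fun x => x.2) := by
    conv_rhs => rw [← PySem.List.map_snd_enumerate L 0, List.map_map]
    rfl
  have hnd : ((PySem.List.enumerate L).map (fun q => q.2.2)).Nodup := by
    rw [hkeymap]; exact snds_nodup_pvScores ts s
  have hitems := PySem.Dict.items_foldl_insert_fresh (PySem.List.enumerate L)
      (fun q => q.2.2) (fun q => pvGap L n q.1 q.2.1) PySem.Dict.empty
      (by intro a _; simp) hnd
  have hmem : ((0 : Int) + (k : Int), L[k]) ∈ PySem.List.enumerate L :=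
    (PySem.List.mem_enumerate_iff _ _ _).mpr ⟨k, hk, rfl⟩
  have hpair : (L[k].2, pvGap L n (k : Int) L[k].1)
      ∈ (List.foldl (fun d q => d.insert q.2.2 (pvGap L n q.1 q.2.1))
          PySem.Dict.empty (PySem.List.enumerate L)).items := by
    rw [hitems]
    refine List.mem_append_right _ (List.mem_map.mpr ⟨_, hmem, ?_⟩)
    simp
  refine PySem.Dict.getD_of_mem_items _ hpair ?_ 0
  have hkeys : (List.foldl (fun d q => d.insert q.2.2 (pvGap L n q.1 q.2.1))
      PySem.Dict.empty (PySem.List.enumerate L)).keys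
      = (PySem.List.enumerate L).map (fun q => q.2.2) := by
    simp only [PySem.Dict.keys]
    rw [hitems]
    simp [List.map_map, Function.comp, PySem.Dict.empty]
  rw [hkeys]; exact hnd

-- A's minimum over the other topics equals B's sorted-neighbour gap
theorem core_min (ts : List String) (s : String → Int) (hnd : ts.Nodup)
    (hn : 2 ≤ ts.length) (i : Nat) (hi : i < ts.length) (k : Nat)
    (hk : k < (pvScores ts s).length)
    (hks : (pvScores ts s)[k] = (s ts[i], (i : Int))) :
    PySem.List.min? ((ts.erase ts[i]).map (fun y2 => |s ts[i] - s y2|)) (fun x => x)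
      = some (pvGap (pvScores ts s) ((pvScores ts s).length : Int) (k : Int)
          (pvScores ts s)[k].1) := by
  set L := pvScores ts s with hL
  have hsnod : (L.map (fun x => x.2)).Nodup := snds_nodup_pvScores ts s
  have hlenL : L.length = ts.length := length_pvScores ts s
  have hlen2 : 2 ≤ L.length := by omega
  have hmono : ∀ p q : Nat, ∀ _ : p ≤ q, ∀ hq : q < L.length, (L[p]'(by omega)).1 ≤ L[q].1 :=
    fun p q hpq hq => mono_pvScores ts s hpq hq
  obtain ⟨hex, hbound⟩ := pvGap_is_nearest L hmono hlen2 k hk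
  set g := pvGap L (L.length : Int) (k : Int) L[k].1 with hg
  set La := (ts.erase ts[i]).map (fun y2 => |s ts[i] - s y2|) with hLa
  have hLane : La ≠ [] := by
    have hle : (ts.erase ts[i]).length = ts.length - 1 :=
      List.length_erase_of_mem (ts.getElem_mem hi)
    intro hnil
    rw [hLa, List.map_eq_nil_iff] at hnil
    have := congrArg List.length hnil
    rw [hle] at this
    simp at this
    omega
  -- every member of La dominates g
  have hlower : ∀ x ∈ La, g ≤ x := by
    intro x hx
    rcases List.mem_map.mp hx with ⟨y2, hy2, rfl⟩
    have hy2' := (hnd.mem_erase_iff).mp hy2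
    rcases List.mem_iff_getElem.mp hy2'.2 with ⟨j, hj, rfl⟩
    have hji : j ≠ i := fun h => hy2'.1 (by subst h; rfl)
    have hmemL : ((s ts[j]), (j : Int)) ∈ L := (mem_pvScores ts s _).mpr ⟨j, hj, rfl⟩
    rcases List.mem_iff_getElem.mp hmemL with ⟨k', hk', hk's⟩
    have hk'k : k' ≠ k := by
      intro h; subst h
      have h2 := hks.symm.trans hk's
      have h3 : (i : Int) = (j : Int) := congrArg Prod.snd h2
      exact hji (by exact_mod_cast h3.symm)
    have hb := hbound k' hk' hk'k
    have e1 : L[k].1 = s ts[i] := by rw [hks]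
    have e2 : L[k'].1 = s ts[j] := by rw [hk's]
    rw [e1, e2] at hb
    exact hb
  -- g itself is a member of La
  have hmem : g ∈ La := by
    rcases hex with ⟨k', hk', hk'k, hgeq⟩
    rcases (mem_pvScores ts s L[k']).mp (L.getElem_mem hk') with ⟨j, hj, hjs⟩
    have hji : j ≠ i := by
      intro h; subst h
      apply hk'k
      have h2 : L[k'].2 = L[k].2 := by rw [hjs, hks]
      have h3 : (L.map (fun x => x.2))[k']'(by simpa using hk')
          = (L.map (fun x => x.2))[k]'(by simpa using hk) := by
        simpa using h2
      exact hsnod.getElem_inj_iff.mp h3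
    refine List.mem_map.mpr ⟨ts[j], ?_, ?_⟩
    · exact (hnd.mem_erase_iff).mpr
        ⟨fun h => hji ((hnd.getElem_inj_iff).mp h), ts.getElem_mem hj⟩
    · have e1 : L[k].1 = s ts[i] := by rw [hks]
      have e2 : L[k'].1 = s ts[j] := by rw [hjs]
      rw [← e1, ← e2, hgeq]
  -- characterise the min
  rcases hmin : PySem.List.min? La (fun x : Int => x) with _ | m
  · exact absurd ((PySem.List.min?_eq_none_iff _ _).mp hmin) hLane
  · have hm1 : m ∈ La := PySem.List.min?_mem hmin
    have hm2 : ∀ x ∈ La, m ≤ x := fun x hx => PySem.List.min?_isMin hmin x hx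
    have : m = g := le_antisymm (hm2 g hmem) (hlower m hm1)
    rw [this]

-- fsy[p.1] is p.2 when the outer keys are distinct
theorem lookup_self (fsy : List (String × List (String × Int)))
    (hnd : (fsy.map (·.1)).Nodup) (p : String × List (String × Int)) (hp : p ∈ fsy) :
    pvLookup fsy p.1 = p.2 := by
  unfold pvLookup
  refine PySem.Dict.getD_of_mem_items (PySem.Dict.mk fsy) (k := p.1) (v := p.2) ?_ ?_ []
  · simpa using hp
  · simpa using hnd

-- A's vocabulary set equals B's ordered dedup of all inner keys
theorem vocab_eq (fsy : List (String × List (String × Int)))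
    (hnd : (fsy.map (·.1)).Nodup) :
    (fsy.map (·.1)).foldl
        (fun v y => PySem.Set.update v ((pvLookup fsy y).map (·.1))) PySem.Set.empty
      = PySem.List.dedup ((fsy.map (·.2)).flatMap (fun ys => ys.map (·.1))) := by
  have hgen : ∀ (ts : List String) (f : String → List String) (v : PySem.Set String),
      ts.foldl (fun v y => PySem.Set.update v (f y)) v
        = (ts.flatMap f).foldl PySem.Set.add v := by
    intro ts f
    induction ts with
    | nil => intro v; simp
    | cons a ts ih =>
      intro v
      simp only [List.foldl_cons, List.flatMap_cons, List.foldl_append,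
        PySem.Set.update_eq_foldl]
      exact ih _
  rw [hgen, PySem.List.dedup_eq_ofList, PySem.Set.ofList_eq_foldl]
  congr 1
  rw [List.flatMap_map, List.flatMap_map]
  exact List.flatMap_congr (fun p hp => by rw [lookup_self fsy hnd p hp])

-- a fold over enumerate(ts) is a fold over ts when the bodies agree positionwise
theorem foldl_enum {α β : Type} (ts : List α) (F : β → α → β) (G : β → Int × α → β) (m : β)
    (h : ∀ (i : Nat) (hi : i < ts.length) (acc : β), G acc ((i : Int), ts[i]) = F acc ts[i]) :
    (PySem.List.enumerate ts).foldl G m = ts.foldl F m := by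
  have h2 : ∀ acc, ∀ p ∈ PySem.List.enumerate ts, G acc p = F acc p.2 := by
    intro acc p hp
    rcases (PySem.List.mem_enumerate_iff _ _ _).mp hp with ⟨i, hi, rfl⟩
    simpa using h i hi acc
  rw [PySem.List.foldl_congr_mem _ _ _ _ h2]
  conv_rhs => rw [← PySem.List.map_snd_enumerate ts 0]
  rw [List.foldl_map]

-- per-term equality of the two inner loops
theorem step_eq (ts : List String) (s : String → Int) (hnd : ts.Nodup)
    (hn : 2 ≤ ts.length) (t : String) (m : PySem.Dict String (PySem.Dict String Int)) :
    ts.foldl (fun m y =>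
        match PySem.List.min? ((ts.filter (fun y2 => y != y2)).map
            (fun y2 => |s y - s y2|)) (fun x => x) with
        | some val => if val ≠ 0 then m.modify y PySem.Dict.empty
            (fun inner => inner.insert t val) else m
        | none => m) m
      = (PySem.List.enumerate ts).foldl (fun m p =>
          let g := (((PySem.List.enumerate (pvScores ts s)).foldl
              (fun d q => d.insert q.2.2
                (pvGap (pvScores ts s) (ts.length : Int) q.1 q.2.1))
              PySem.Dict.empty)).getD p.1 0
          if g ≠ 0 then m.modify p.2 PySem.Dict.empty
            (fun inner => inner.insert t g) else m) m := by
  refine (foldl_enum ts _ _ m ?_).symm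
  intro i hi acc
  have hlen : (pvScores ts s).length = ts.length := length_pvScores ts s
  -- position k of topic i's pair in the sorted list
  have hmemL : ((s ts[i]), (i : Int)) ∈ pvScores ts s :=
    (mem_pvScores ts s _).mpr ⟨i, hi, rfl⟩
  rcases List.mem_iff_getElem.mp hmemL with ⟨k, hk, hks⟩
  have hks' : (pvScores ts s)[k] = (s ts[i], (i : Int)) := hks
  -- the gaps-dict lookup at i
  have hgetd := gaps_getD ts s (ts.length : Int) k hk
  rw [hks'] at hgetd
  -- the value A's min computes
  have hval := core_min ts s hnd hn i hi k hk hks'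
  rw [hks'] at hval
  rw [hlen] at hval
  -- A's filter is erase of the (unique) topic
  have hfe : ts.filter (fun y2 => ts[i] != y2) = ts.erase ts[i] := by
    rw [hnd.erase_eq_filter]
    exact List.filter_congr (fun x _ => bne_comm ..)
  simp only [hfe, hval]
  simpa using hgetd.symm ▸ rfl

-- ===== VERDICT (by name: the statement is the Claim_ definition above) =====
theorem get_mcdy_spec : Claim_equal_get_mcdy := by
  intro fsy _ hpre
  obtain ⟨hnd, hinner, h1⟩ := hpre
  unfold Spec_get_mcdy
  by_cases hn2 : 2 ≤ fsy.length
  · -- at least two topics: same vocabulary, then the per-term loops agree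
    simp only [get_mcdy, get_mcdy_alt]
    rw [if_neg (by simp only [List.length_map]; omega)]
    rw [vocab_eq fsy hnd]
    congr 2
    refine PySem.List.foldl_congr_mem _ _ _ _ ?_
    intro acc t _
    exact step_eq (fsy.map (·.1)) (fun y => pvScore (pvLookup fsy y) t) hnd
      (by simpa using hn2) t acc
  · rcases fsy with _ | ⟨p, _ | ⟨q, rest2⟩⟩
    · rfl
    · -- single topic: Pre_ forces an empty inner dict, both sides return {y: {}}
      have hp2 : p.2 = [] := h1 rfl p (by simp)
      simp only [get_mcdy, get_mcdy_alt]
      have hlook : pvLookup [p] p.1 = p.2 := lookup_self [p] (by simp) p (by simp)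
      rw [if_pos (by norm_num)]
      simp [hlook, hp2, PySem.Set.update_eq_foldl]
    · simp at hn2
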